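-- pv_equiv track=rewrite | github.com/baixinjie168/operator-blue | OperatorTestProject/src/result_saver.py | _pop_matching_entry
-- ===== SOURCE A (Python) =====
-- from typing import Dict, Any, Optional
--
-- def _pop_matching_entry(
--         previous_entry: Dict[str, str],
--         current_entries: list[Dict[str, str]]
-- ) -> Optional[Dict[str, str]]:
--     """
--     从当前错误列表中找到与历史错误最匹配的一条并移除
--
--     优先按 error_path + error_message 精确匹配，失败后退化为仅按 error_path 匹配。
--     """
--     previous_path = previous_entry.get("error_path", "").strip()
--     previous_message = previous_entry.get("error_message", "").strip()
--
--     for index, current_entry in enumerate(current_entries):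
--         if (
--                 current_entry.get("error_path", "").strip() == previous_path
--                 and current_entry.get("error_message", "").strip() == previous_message
--         ):
--             return current_entries.pop(index)
--
--     for index, current_entry in enumerate(current_entries):
--         if current_entry.get("error_path", "").strip() == previous_path:
--             return current_entries.pop(index)
--
--     return None
-- ===== SOURCE B (Python) =====
-- from typing import Dict, Any, Optional
--
-- def _pop_matching_entry(
--         previous_entry: Dict[str, str],
--         current_entries: list[Dict[str, str]]
-- ) -> Optional[Dict[str, str]]:
--     previous_path = previous_entry.get("error_path", "").strip()
--     previous_message = previous_entry.get("error_message", "").strip()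
--
--     # score each path-matching entry: 0 = exact (path+message), 1 = path-only;
--     # keep the best-scoring earliest candidate, stopping as soon as a perfect one is seen
--     best = None  # (score, index)
--     for index, entry in enumerate(current_entries):
--         if entry.get("error_path", "").strip() != previous_path:
--             continue
--         score = 0 if entry.get("error_message", "").strip() == previous_message else 1
--         if best is None or score < best[0]:
--             best = (score, index)
--             if score == 0:
--                 break
--
--     if best is None:
--         return None
--     return current_entries.pop(best[1])
-- ===== Notes on version B (the rewrite author's own statement) =====
-- stated objective: alternative
-- what changed: Replaces A's two sequential scans (exact-match pass, then path-only pass) by a single scored-selection pass: each path-matching entry gets a score (0 exact, 1 path-only) and the earliest best-scoring candidate is popped, with an early stop on a perfect score.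
import Mathlib
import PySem

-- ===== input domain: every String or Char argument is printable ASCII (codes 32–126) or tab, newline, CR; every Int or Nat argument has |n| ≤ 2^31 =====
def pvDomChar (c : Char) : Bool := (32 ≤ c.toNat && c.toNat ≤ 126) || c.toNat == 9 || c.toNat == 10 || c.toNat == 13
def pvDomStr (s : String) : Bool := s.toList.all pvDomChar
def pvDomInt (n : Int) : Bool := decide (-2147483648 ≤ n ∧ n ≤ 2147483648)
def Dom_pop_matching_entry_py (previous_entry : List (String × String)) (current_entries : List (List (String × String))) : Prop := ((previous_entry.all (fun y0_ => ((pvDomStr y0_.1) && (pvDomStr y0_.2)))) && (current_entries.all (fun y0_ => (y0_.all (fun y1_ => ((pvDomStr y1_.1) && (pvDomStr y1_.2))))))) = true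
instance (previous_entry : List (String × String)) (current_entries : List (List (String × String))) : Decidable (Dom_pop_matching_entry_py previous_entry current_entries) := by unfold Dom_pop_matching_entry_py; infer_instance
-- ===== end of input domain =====

-- B replaces A's two sequential scans by one scored-selection pass; equivalence is about the RETURN value
-- only (both Pythons also pop the returned entry from current_entries, the ports do not model that).

-- d.get(k, "").strip()  (association list, first match = Python dict lookup)
def pvGetStrip (d : List (String × String)) (k : String) : String :=
  PySem.Str.strip (((d.find? (fun kv => kv.1 == k)).map Prod.snd).getD "")

-- ===== PORT A =====
-- first loop of A: return the first entry matching path and message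
def pvFindExact (p m : String) : List (List (String × String)) → Option (List (String × String))
  | [] => none
  | e :: rest =>
      if (pvGetStrip e "error_path" == p) && (pvGetStrip e "error_message" == m) then some e
      else pvFindExact p m rest

-- second loop of A: return the first entry matching path only
def pvFindPath (p : String) : List (List (String × String)) → Option (List (String × String))
  | [] => none
  | e :: rest =>
      if pvGetStrip e "error_path" == p then some e
      else pvFindPath p rest

def pop_matching_entry_py (previous_entry : List (String × String)) (current_entries : List (List (String × String))) : Option (List (String × String)) :=
  let previous_path := pvGetStrip previous_entry "error_path"
  let previous_message := pvGetStrip previous_entry "error_message"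
  match pvFindExact previous_path previous_message current_entries with
  | some e => some e
  | none => pvFindPath previous_path current_entries

-- ===== PORT B =====
-- B's single scored loop; `best` carries (score, candidate entry) — the entry at the recorded index,
-- since the final pop only returns that entry.  Early exit (Python's break) on score 0.
def pvBestScan (p m : String) : List (List (String × String)) → Option (Nat × List (String × String)) → Option (Nat × List (String × String))
  | [], best => best
  | e :: rest, best =>
      if pvGetStrip e "error_path" == p then
        let score : Nat := if pvGetStrip e "error_message" == m then 0 else 1
        if best.elim true (fun b => score < b.1) then
          if score == 0 then some (score, e)
          else pvBestScan p m rest (some (score, e))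
        else pvBestScan p m rest best
      else pvBestScan p m rest best

def pop_matching_entry_py_alt (previous_entry : List (String × String)) (current_entries : List (List (String × String))) : Option (List (String × String)) :=
  let previous_path := pvGetStrip previous_entry "error_path"
  let previous_message := pvGetStrip previous_entry "error_message"
  (pvBestScan previous_path previous_message current_entries none).map Prod.snd

-- ===== PRECONDITION & SPEC =====
def Spec_pop_matching_entry_py (previous_entry : List (String × String)) (current_entries : List (List (String × String))) (out : Option (List (String × String))) : Prop := out = pop_matching_entry_py_alt previous_entry current_entries
instance (previous_entry : List (String × String)) (current_entries : List (List (String × String))) (out : Option (List (String × String))) : Decidable (Spec_pop_matching_entry_py previous_entry current_entries out) := by unfold Spec_pop_matching_entry_py; infer_instance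

-- ===== CLAIM (what is proved, stated in full; the proofs are below) =====
def Claim_equal_pop_matching_entry_py : Prop := ∀ (previous_entry : List (String × String)) (current_entries : List (List (String × String))), Dom_pop_matching_entry_py previous_entry current_entries → Spec_pop_matching_entry_py previous_entry current_entries (pop_matching_entry_py previous_entry current_entries)

-- ===== LEMMAS AND PROOFS =====
-- once a score-1 fallback is recorded, only a later exact match can replace it
theorem pvBestScan_one (p m : String) (l : List (List (String × String))) (f : List (String × String)) :
    pvBestScan p m l (some (1, f)) = some ((pvFindExact p m l).elim (1, f) (fun e => (0, e))) := by
  induction l with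
  | nil => simp [pvBestScan, pvFindExact]
  | cons e rest ih =>
    simp only [pvBestScan, pvFindExact]
    by_cases hp : (pvGetStrip e "error_path" == p) = true
    · by_cases hm : (pvGetStrip e "error_message" == m) = true
      · simp [hp, hm]
      · simp [hp, hm, ih]
    · simp [hp, ih]

-- from the empty state, the scan returns the first exact match (score 0), else the first path-only match (score 1)
theorem pvBestScan_none (p m : String) (l : List (List (String × String))) :
    pvBestScan p m l none =
      ((pvFindExact p m l).map (fun e => (0, e))).or ((pvFindPath p l).map (fun e => (1, e))) := by
  induction l with
  | nil => simp [pvBestScan, pvFindExact, pvFindPath]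
  | cons e rest ih =>
    simp only [pvBestScan, pvFindExact, pvFindPath]
    by_cases hp : (pvGetStrip e "error_path" == p) = true
    · by_cases hm : (pvGetStrip e "error_message" == m) = true
      · simp [hp, hm]
      · simp only [hp, hm, Bool.and_false, Bool.true_and, if_true, if_neg Bool.false_ne_true]
        rw [pvBestScan_one]
        cases h : pvFindExact p m rest <;> simp [h]
    · simp [hp, ih]
  
-- ===== VERDICT (by name: the statement is the Claim_ definition above) =====
theorem pop_matching_entry_py_spec : Claim_equal_pop_matching_entry_py := by
  intro pe ce _
  unfold Spec_pop_matching_entry_py pop_matching_entry_py pop_matching_entry_py_alt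
  simp only []
  rw [pvBestScan_none]
  cases h : pvFindExact (pvGetStrip pe "error_path") (pvGetStrip pe "error_message") ce
  · cases h2 : pvFindPath (pvGetStrip pe "error_path") ce <;> simp [h, h2]
  · simp [h]
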